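-- pv_equiv track=rewrite | github.com/gavento/problens-web | scripts/collect-rosetta-code.py | likely_in_string
-- ===== SOURCE A (Python) =====
-- def likely_in_string(line, pattern, pos=None):
--     """Enhanced heuristic to check if pattern is likely inside a string literal"""
--     if pos is None:
--         pos = line.find(pattern)
--     if pos == -1:
--         return False
--
--     before_pattern = line[:pos]
--
--     # Count unescaped quotes
--     single_quotes = 0
--     double_quotes = 0
--     i = 0
--
--     while i < len(before_pattern):
--         if before_pattern[i] == "'" and (i == 0 or before_pattern[i-1] != '\\'):
--             single_quotes += 1
--         elif before_pattern[i] == '"' and (i == 0 or before_pattern[i-1] != '\\'):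
--             double_quotes += 1
--         i += 1
--
--     # If odd number of quotes, we're inside a string
--     return (single_quotes % 2 == 1) or (double_quotes % 2 == 1)
-- ===== SOURCE B (Python) =====
-- def likely_in_string(line, pattern, pos=None):
--     """Enhanced heuristic to check if pattern is likely inside a string literal"""
--     if pos is None:
--         pos = line.find(pattern)
--     if pos == -1:
--         return False
--     before = line[:pos]
--     # unescaped quotes = all quotes minus those directly preceded by a backslash
--     single = before.count("'") - before.count("\\'")
--     double = before.count('"') - before.count('\\"')
--     return single % 2 == 1 or double % 2 == 1
-- ===== Notes on version B (the rewrite author's own statement) =====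
-- stated objective: faster
-- what changed: Replaces the index-based while-loop with its one-character lookback by two substring counts per quote kind (str.count of the quote minus str.count of backslash+quote), so unescaped-quote parity comes from built-in counting instead of a hand-written scan.
import Mathlib
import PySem

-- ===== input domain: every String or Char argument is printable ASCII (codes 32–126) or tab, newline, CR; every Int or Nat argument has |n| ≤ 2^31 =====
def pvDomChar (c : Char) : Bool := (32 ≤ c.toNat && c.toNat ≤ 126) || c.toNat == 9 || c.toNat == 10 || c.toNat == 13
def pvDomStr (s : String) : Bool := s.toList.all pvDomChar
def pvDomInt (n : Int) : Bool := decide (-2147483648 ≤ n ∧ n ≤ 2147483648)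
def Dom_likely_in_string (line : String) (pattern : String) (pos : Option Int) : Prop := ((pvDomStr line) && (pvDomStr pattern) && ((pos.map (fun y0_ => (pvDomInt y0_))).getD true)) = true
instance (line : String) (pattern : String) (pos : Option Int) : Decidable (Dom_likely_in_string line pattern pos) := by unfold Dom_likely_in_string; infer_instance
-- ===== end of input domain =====

-- B replaces A's index-scanning while-loop (one-character lookback per position) by two built-in
-- substring counts per quote kind: unescaped quotes = count(quote) - count(backslash+quote); measured faster (built-in counting).


-- ===== PORT A =====
-- the while-loop of A: i scans `before`, counting unescaped single and double quotes
def pvLoopA (before : List Char) (i : Nat) (sq dq : Int) : Int × Int :=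
  if h : i < before.length then
    if before[i] = '\'' ∧ (i = 0 ∨ before[i-1]! ≠ '\\') then
      pvLoopA before (i+1) (sq+1) dq
    else if before[i] = '"' ∧ (i = 0 ∨ before[i-1]! ≠ '\\') then
      pvLoopA before (i+1) sq (dq+1)
    else
      pvLoopA before (i+1) sq dq
  else (sq, dq)
termination_by before.length - i

def likely_in_string (line : String) (pattern : String) (pos : Option Int) : Bool :=
  let p : Int := match pos with | none => PySem.Str.find line pattern | some v => v
  if p = -1 then false
  else
    let before := PySem.Chars.slice line.toList none (some p)
    let sd := pvLoopA before 0 0 0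
    decide (PySem.Int.mod sd.1 2 = 1) || decide (PySem.Int.mod sd.2 2 = 1)

-- ===== PORT B =====
def likely_in_string_alt (line : String) (pattern : String) (pos : Option Int) : Bool :=
  let p : Int := match pos with | none => PySem.Str.find line pattern | some v => v
  if p = -1 then false
  else
    let before := PySem.Chars.slice line.toList none (some p)
    let single : Int := (PySem.Chars.count before ['\''] : Int) - (PySem.Chars.count before ['\\', '\''] : Int)
    let double : Int := (PySem.Chars.count before ['"'] : Int) - (PySem.Chars.count before ['\\', '"'] : Int)
    decide (PySem.Int.mod single 2 = 1) || decide (PySem.Int.mod double 2 = 1)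

-- ===== PRECONDITION & SPEC =====
def Spec_likely_in_string (line : String) (pattern : String) (pos : Option Int) (out : Bool) : Prop := out = likely_in_string_alt line pattern pos
instance (line : String) (pattern : String) (pos : Option Int) (out : Bool) : Decidable (Spec_likely_in_string line pattern pos out) := by unfold Spec_likely_in_string; infer_instance

-- ===== CLAIM (what is proved, stated in full; the proofs are below) =====
def Claim_equal_likely_in_string : Prop := ∀ (line : String) (pattern : String) (pos : Option Int), Dom_likely_in_string line pattern pos → Spec_likely_in_string line pattern pos (likely_in_string line pattern pos)

-- ===== LEMMAS AND PROOFS =====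

-- number of adjacent pairs (backslash, q) in cs, i.e. escaped occurrences of q
def pvPairE (q : Char) : List Char → Nat
  | [] => 0
  | a :: t => (if a = '\\' ∧ t.head? = some q then 1 else 0) + pvPairE q t

-- unescaped occurrences of q in cs, given the character just before cs (none at position 0)
def pvUCnt (q : Char) : Option Char → List Char → Int
  | _, [] => 0
  | prev, c :: t => (if c = q ∧ prev ≠ some '\\' then 1 else 0) + pvUCnt q (some c) t

def pvPrev (cs : List Char) (i : Nat) : Option Char :=
  if i = 0 then none else some (cs[i-1]!)

lemma pvLoopA_eq (cs : List Char) (i : Nat) (sq dq : Int) :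
    pvLoopA cs i sq dq =
      (sq + pvUCnt '\'' (pvPrev cs i) (cs.drop i), dq + pvUCnt '"' (pvPrev cs i) (cs.drop i)) := by
  fun_induction pvLoopA cs i sq dq with
  | case1 i sq dq h hc ih =>
    have hprev : pvPrev cs (i + 1) = some cs[i] := by
      simp [pvPrev, getElem!_pos cs i h]
    have hne : pvPrev cs i ≠ some '\\' := by
      rcases hc.2 with h0 | h0
      · simp [pvPrev, h0]
      · by_cases h0i : i = 0
        · simp [pvPrev, h0i]
        · simp only [pvPrev, if_neg h0i]
          exact fun hx => h0 (Option.some_injective _ hx)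
    have h2 : ¬ (cs[i] = '"' ∧ pvPrev cs i ≠ some '\\') := by
      intro hx; rw [hc.1] at hx; exact absurd hx.1 (by decide)
    rw [ih, List.drop_eq_getElem_cons h, pvUCnt, pvUCnt, hprev,
      if_pos (And.intro hc.1 hne), if_neg h2]
    refine Prod.ext ?_ ?_ <;> simp <;> ring
  | case2 i sq dq h hc1 hc2 ih =>
    have hprev : pvPrev cs (i + 1) = some cs[i] := by
      simp [pvPrev, getElem!_pos cs i h]
    have hne : pvPrev cs i ≠ some '\\' := by
      rcases hc2.2 with h0 | h0
      · simp [pvPrev, h0]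
      · by_cases h0i : i = 0
        · simp [pvPrev, h0i]
        · simp only [pvPrev, if_neg h0i]
          exact fun hx => h0 (Option.some_injective _ hx)
    have h1 : ¬ (cs[i] = '\'' ∧ pvPrev cs i ≠ some '\\') := by
      intro hx; rw [hc2.1] at hx; exact absurd hx.1 (by decide)
    rw [ih, List.drop_eq_getElem_cons h, pvUCnt, pvUCnt, hprev,
      if_pos (And.intro hc2.1 hne), if_neg h1]
    refine Prod.ext ?_ ?_ <;> simp <;> ring
  | case3 i sq dq h hc1 hc2 ih =>
    have hprev : pvPrev cs (i + 1) = some cs[i] := by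
      simp [pvPrev, getElem!_pos cs i h]
    have hiff : (pvPrev cs i ≠ some '\\') → (i = 0 ∨ cs[i-1]! ≠ '\\') := by
      intro hx
      by_cases h0 : i = 0
      · exact Or.inl h0
      · right; intro hb; exact hx (by simp [pvPrev, h0, hb])
    have h1 : ¬ (cs[i] = '\'' ∧ pvPrev cs i ≠ some '\\') := by
      intro hx; exact hc1 ⟨hx.1, hiff hx.2⟩
    have h2 : ¬ (cs[i] = '"' ∧ pvPrev cs i ≠ some '\\') := by
      intro hx; exact hc2 ⟨hx.1, hiff hx.2⟩
    rw [ih, List.drop_eq_getElem_cons h, pvUCnt, pvUCnt, hprev, if_neg h1, if_neg h2]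
    refine Prod.ext ?_ ?_ <;> simp
  | case4 i sq dq h =>
    rw [List.drop_eq_nil_of_le (Nat.le_of_not_lt h)]
    simp [pvUCnt]

lemma pvUCnt_eq (q : Char) (hq : q ≠ '\\') (cs : List Char) : ∀ prev : Option Char,
    pvUCnt q prev cs =
      (cs.countP (· = q) : Int) - (pvPairE q cs : Int) -
        (if prev = some '\\' ∧ cs.head? = some q then 1 else 0) := by
  induction cs with
  | nil => intro prev; simp [pvUCnt, pvPairE]
  | cons c t ih =>
    intro prev
    rw [pvUCnt, ih (some c), pvPairE, List.countP_cons]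
    simp only [List.head?_cons, decide_eq_true_eq]
    have hbq : ¬ (('\\' : Char) = q) := fun h => hq h.symm
    split_ifs <;> simp_all <;> omega

lemma pvCount_go_single (q : Char) : ∀ (fuel : Nat) (cs : List Char) (acc : Nat),
    cs.length ≤ fuel → PySem.Chars.count.go [q] fuel cs acc = acc + cs.countP (· = q) := by
  intro fuel
  induction fuel with
  | zero =>
    intro cs acc h
    have hnil : cs = [] := List.length_eq_zero_iff.mp (by omega)
    subst hnil; rfl
  | succ n ih =>
    intro cs acc h
    cases cs with
    | nil => rfl
    | cons c t =>
      rw [PySem.Chars.count.go]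
      by_cases hc : q = c
      · have : List.isPrefixOf [q] (c :: t) = true := by simp [List.isPrefixOf, hc]
        rw [if_pos this]
        simp only [List.length_cons, List.length_nil, List.drop_succ_cons, List.drop_zero]
        rw [ih t (acc + 1) (by simpa using Nat.lt_succ_iff.mp (by simpa using h)), List.countP_cons]
        simp [hc]
        omega
      · have : List.isPrefixOf [q] (c :: t) = false := by
          simp [List.isPrefixOf, hc]
        rw [if_neg (by simp [this])]
        rw [ih t acc (by simpa using Nat.lt_succ_iff.mp (by simpa using h)), List.countP_cons]
        simp [Ne.symm hc]

lemma pvCount_go_pair (q : Char) (hq : q ≠ '\\') : ∀ (fuel : Nat) (cs : List Char) (acc : Nat),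
    cs.length ≤ fuel → PySem.Chars.count.go ['\\', q] fuel cs acc = acc + pvPairE q cs := by
  intro fuel
  induction fuel with
  | zero =>
    intro cs acc h
    have hnil : cs = [] := List.length_eq_zero_iff.mp (by omega)
    subst hnil; rfl
  | succ n ih =>
    intro cs acc h
    cases cs with
    | nil => rfl
    | cons c t =>
      rw [PySem.Chars.count.go]
      by_cases hc : c = '\\' ∧ t.head? = some q
      · obtain ⟨b, t', rfl⟩ : ∃ b t', t = b :: t' := by
          cases t with
          | nil => simp at hc
          | cons b t' => exact ⟨b, t', rfl⟩
        have hb : b = q := by simpa using hc.2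
        have hpre : List.isPrefixOf ['\\', q] (c :: b :: t') = true := by
          simp [List.isPrefixOf, hc.1, hb]
        rw [if_pos hpre]
        simp only [List.length_cons, List.length_nil, List.drop_succ_cons, List.drop_zero]
        have hlen : t'.length ≤ n := by simp at h; omega
        rw [ih t' (acc + 1) hlen, pvPairE, pvPairE]
        have : ¬ (b = '\\' ∧ t'.head? = some q) := by
          intro hx; exact hq (hb ▸ hx.1)
        simp [hc.1, hc.2, this]
        omega
      · have hpre : List.isPrefixOf ['\\', q] (c :: t) = false := by
          cases t with
          | nil => simp [List.isPrefixOf]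
          | cons b t' =>
            simp only [List.isPrefixOf, Bool.and_eq_false_iff] at *
            by_cases h1 : '\\' = c
            · simp only [List.head?_cons] at hc
              have : ¬ (q = b) := fun hx => hc ⟨h1.symm, by rw [hx]⟩
              simp [List.isPrefixOf, h1, this]
            · simp [List.isPrefixOf, h1]
        rw [if_neg (by simp [hpre])]
        have hlen : t.length ≤ n := by simp at h; omega
        rw [ih t acc hlen, pvPairE]
        have : ¬ (c = '\\' ∧ t.head? = some q) := hc
        simp [this]
  
lemma pvCount_single (q : Char) (cs : List Char) :
    PySem.Chars.count cs [q] = cs.countP (· = q) := by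
  rw [PySem.Chars.count]
  simp only [List.isEmpty_cons, if_false, Bool.false_eq_true]
  simpa using pvCount_go_single q cs.length cs 0 le_rfl

lemma pvCount_pair (q : Char) (hq : q ≠ '\\') (cs : List Char) :
    PySem.Chars.count cs ['\\', q] = pvPairE q cs := by
  rw [PySem.Chars.count]
  simp only [List.isEmpty_cons, if_false, Bool.false_eq_true]
  simpa using pvCount_go_pair q hq cs.length cs 0 le_rfl

lemma pvMain (cs : List Char) :
    pvLoopA cs 0 0 0 =
      ((PySem.Chars.count cs ['\''] : Int) - (PySem.Chars.count cs ['\\', '\''] : Int),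
       (PySem.Chars.count cs ['"'] : Int) - (PySem.Chars.count cs ['\\', '"'] : Int)) := by
  rw [pvLoopA_eq, show pvPrev cs 0 = none from rfl]
  simp only [List.drop_zero, zero_add]
  rw [pvUCnt_eq '\'' (by decide) cs none, pvUCnt_eq '"' (by decide) cs none,
    pvCount_single, pvCount_single, pvCount_pair '\'' (by decide), pvCount_pair '"' (by decide)]
  simp

-- ===== VERDICT (by name: the statement is the Claim_ definition above) =====
theorem likely_in_string_spec : Claim_equal_likely_in_string := by
  intro line pattern pos _
  unfold Spec_likely_in_string likely_in_string likely_in_string_alt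
  cases pos <;>
  · simp only []
    split
    · rfl
    · rw [pvMain]
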